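-- pv_equiv track=rewrite | github.com/Amike31/Cipher_Machine | cipher-web/server/Playfair.py | makeBigramArr
-- ===== SOURCE A (Python) =====
-- def strOnlyAlphabets(s):
--     ret = ""
--     if s.isalpha():
--         ret = s
--     else:
--         for c in s:
--             if c.isalpha():
--                 ret += c
--     return ret
--
-- def makeBigramArr(p):
--     # FOR Message
--     p = strOnlyAlphabets(p)
--     p = p.upper()
--     p = p.replace("J","I")
--     allBigram = []
--
--     i = 0
--     while i < len(p):
--         if i+1 != len(p):
--             bigram = p[i:i+2]
--             if bigram[0] == bigram[1]:
--                 p = p[:i+1] + "X" + p[i+1:]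
--                 bigram = bigram[0]+"X"
--             allBigram.append(bigram)
--         i += 2
--
--     if len(p)%2 != 0:
--         p += "X"
--         bigram = p[len(p)-2:]
--         allBigram.append(bigram)
--
--     return allBigram
-- ===== SOURCE B (Python) =====
-- def makeBigramArr(p):
--     # One linear pass: filter/normalize each char on the fly and pair it with a
--     # pending char, emitting "<pend>X" on doubles and "<pend>X" padding at the end.
--     out = []
--     pend = None
--     for c in p:
--         if not c.isalpha():
--             continue
--         c = c.upper()
--         if c == 'J':
--             c = 'I'
--         if pend is None:
--             pend = c
--         elif pend == c:
--             out.append(pend + 'X')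
--         else:
--             out.append(pend + c)
--             pend = None
--     if pend is not None:
--         out.append(pend + 'X')
--     return out
-- ===== Notes on version B (the rewrite author's own statement) =====
-- stated objective: faster
-- what changed: Replaces A's quadratic scheme (filter the whole string first, then repeatedly rebuild the string by slicing to insert X and reslice each bigram) with a single linear pass that normalizes each character on the fly and pairs it with a pending character, emitting bigrams and X-padding inline.
import Mathlib
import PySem

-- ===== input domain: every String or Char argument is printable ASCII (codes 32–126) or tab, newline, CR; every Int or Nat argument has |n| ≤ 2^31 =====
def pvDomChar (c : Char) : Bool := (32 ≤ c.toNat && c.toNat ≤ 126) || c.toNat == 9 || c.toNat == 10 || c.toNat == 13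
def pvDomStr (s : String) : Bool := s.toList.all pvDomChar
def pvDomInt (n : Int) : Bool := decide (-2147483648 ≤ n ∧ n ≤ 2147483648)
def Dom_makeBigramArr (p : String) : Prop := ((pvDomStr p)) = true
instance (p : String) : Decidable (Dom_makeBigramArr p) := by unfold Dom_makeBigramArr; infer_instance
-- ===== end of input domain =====

-- B replaces A's quadratic "rebuild the string to insert X, reslice each bigram" loop by a
-- single linear pass pairing normalized characters with a pending char (objective: faster).

-- ===== PORT A =====

-- strOnlyAlphabets: the if-all-alpha shortcut, else a char-by-char filter, as in A.
def pvStrOnlyAlphabets (s : List Char) : List Char :=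
  if PySem.Chars.strIsalpha s then s
  else s.foldl (fun ret c => if PySem.Chars.isalpha c then ret ++ [c] else ret) []

-- A's while loop: i steps by 2, the string p is rebuilt (p[:i+1] + "X" + p[i+1:]) on doubles.
-- Slices are exact for the nonneg indices used here: p[i:i+2] = (p.drop i).take 2,
-- p[:i+1] = p.take (i+1), p[i+1:] = p.drop (i+1).
def pvLoopA (p : List Char) (i : Nat) (acc : List String) : List Char × List String :=
  if h : i < p.length then
    if hne : i + 1 = p.length then
      pvLoopA p (i + 2) acc
    else
      match (p.drop i).take 2 with
      | [a, c] =>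
        if a = c then
          pvLoopA (p.take (i + 1) ++ 'X' :: p.drop (i + 1)) (i + 2)
            (acc ++ [String.ofList [a, 'X']])
        else
          pvLoopA p (i + 2) (acc ++ [String.ofList [a, c]])
      | _ => (p, acc)   -- unreachable: i + 1 < p.length gives the slice exactly 2 chars
  else (p, acc)
termination_by p.length - i
decreasing_by
  · omega
  · simp; omega
  · omega

def makeBigramArr (p : String) : List String :=
  let p1 := pvStrOnlyAlphabets p.toList
  let p2 := PySem.Chars.upper p1
  let p3 := PySem.Chars.replace p2 ['J'] ['I']
  let r := pvLoopA p3 0 []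
  if r.1.length % 2 ≠ 0 then
    let p4 := r.1 ++ ['X']
    r.2 ++ [String.ofList (p4.drop (p4.length - 2))]
  else r.2

-- ===== PORT B =====

-- One pass over the raw chars: skip non-letters, normalize (upper, J→I), pair with a
-- pending char; equal pair emits "<pend>X" keeping the char pending, leftover pads with X.
def pvLoopB : List Char → Option Char → List String → List String
  | [], pend, acc =>
    match pend with
    | none => acc
    | some a => acc ++ [String.ofList [a, 'X']]
  | c :: rest, pend, acc =>
    if PySem.Chars.isalpha c then
      let c1 := PySem.Chars.upperChar c
      let c2 := if c1 = 'J' then 'I' else c1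
      match pend with
      | none => pvLoopB rest (some c2) acc
      | some a =>
        if a = c2 then pvLoopB rest (some c2) (acc ++ [String.ofList [a, 'X']])
        else pvLoopB rest none (acc ++ [String.ofList [a, c2]])
    else pvLoopB rest pend acc

def makeBigramArr_alt (p : String) : List String := pvLoopB p.toList none []

-- ===== PRECONDITION & SPEC =====
def Spec_makeBigramArr (p : String) (out : List String) : Prop := out = makeBigramArr_alt p
instance (p : String) (out : List String) : Decidable (Spec_makeBigramArr p out) := by unfold Spec_makeBigramArr; infer_instance

-- ===== CLAIM (what is proved, stated in full; the proofs are below) =====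
def Claim_equal_makeBigramArr : Prop := ∀ (p : String), Dom_makeBigramArr p → Spec_makeBigramArr p (makeBigramArr p)

-- ===== LEMMAS AND PROOFS =====

-- normalization of one kept character: upper, then J -> I
def pvNorm (c : Char) : Char :=
  if PySem.Chars.upperChar c = 'J' then 'I' else PySem.Chars.upperChar c

-- the cleaned text both versions effectively pair up
def pvClean (l : List Char) : List Char :=
  (l.filter PySem.Chars.isalpha).map pvNorm

-- reference bigram splitter on the cleaned text
def pvG : List Char → List String
  | [] => []
  | [a] => [String.ofList [a, 'X']]
  | a :: b :: t =>
      if a = b then String.ofList [a, 'X'] :: pvG (b :: t)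
      else String.ofList [a, b] :: pvG t

def pvPostA (r : List Char × List String) : List String :=
  if r.1.length % 2 ≠ 0 then
    r.2 ++ [String.ofList ((r.1 ++ ['X']).drop ((r.1 ++ ['X']).length - 2))]
  else r.2

lemma pvFoldlFilter (l : List Char) (acc : List Char) :
    l.foldl (fun ret c => if PySem.Chars.isalpha c then ret ++ [c] else ret) acc
      = acc ++ l.filter PySem.Chars.isalpha := by
  induction l generalizing acc with
  | nil => simp
  | cons c t ih =>
    by_cases h : PySem.Chars.isalpha c <;> simp [List.filter_cons, h, ih]

lemma pvStrOnly_eq (l : List Char) :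
    pvStrOnlyAlphabets l = l.filter PySem.Chars.isalpha := by
  unfold pvStrOnlyAlphabets
  split
  · next h =>
    have hall : ∀ x ∈ l, PySem.Chars.isalpha x = true := by
      simp [PySem.Chars.strIsalpha] at h; exact h.2
    exact (List.filter_eq_self.mpr hall).symm
  · exact pvFoldlFilter l []

lemma pvReplaceGo (fuel : Nat) :
    ∀ (l acc : List Char), l.length ≤ fuel →
      PySem.Chars.replace.go ['J'] ['I'] fuel l acc
        = acc.reverse ++ l.map (fun c => if c = 'J' then 'I' else c) := by
  induction fuel with
  | zero =>
    intro l acc h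
    have : l = [] := by cases l <;> simp_all
    subst this; simp [PySem.Chars.replace.go]
  | succ n ih =>
    intro l acc h
    cases l with
    | nil => simp [PySem.Chars.replace.go]
    | cons c t =>
      rw [PySem.Chars.replace.go]
      by_cases hc : c = 'J'
      · subst hc
        have hpre : List.isPrefixOf ['J'] ('J' :: t) = true := by
          simp [List.isPrefixOf]
        rw [if_pos hpre]
        have := ih t ('I' :: acc) (by simpa using Nat.le_of_succ_le_succ h)
        simpa using this
      · have hpre : List.isPrefixOf ['J'] (c :: t) = false := by
          simp [List.isPrefixOf]; exact fun hx => hc hx.symm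
        rw [if_neg (by simp [hpre])]
        have := ih t (c :: acc) (by simpa using Nat.le_of_succ_le_succ h)
        simpa [hc] using this

lemma pvReplaceJI (l : List Char) :
    PySem.Chars.replace l ['J'] ['I'] = l.map (fun c => if c = 'J' then 'I' else c) := by
  simp [PySem.Chars.replace, pvReplaceGo l.length l [] le_rfl]

lemma pvPre_eq (l : List Char) :
    PySem.Chars.replace (PySem.Chars.upper (pvStrOnlyAlphabets l)) ['J'] ['I'] = pvClean l := by
  rw [pvStrOnly_eq, PySem.Chars.upper, pvReplaceJI, List.map_map]
  rfl

lemma pvMake_eq_post (p : String) :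
    makeBigramArr p = pvPostA (pvLoopA (pvClean p.toList) 0 []) := by
  simp only [makeBigramArr, pvPre_eq, pvPostA]

lemma pvLoopB_eq (l : List Char) :
    ∀ (pend : Option Char) (acc : List String),
      pvLoopB l pend acc
        = acc ++ (match pend with
                  | none => pvG (pvClean l)
                  | some a => pvG (a :: pvClean l)) := by
  induction l with
  | nil =>
    intro pend acc
    cases pend <;> simp [pvLoopB, pvClean, pvG]
  | cons c t ih =>
    intro pend acc
    by_cases hc : PySem.Chars.isalpha c
    · have hclean : pvClean (c :: t) = pvNorm c :: pvClean t := by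
        simp [pvClean, List.filter_cons, hc]
      cases pend with
      | none =>
        simp only [pvLoopB, if_pos hc, hclean]
        rw [ih]
        simp [pvNorm]
      | some a =>
        simp only [pvLoopB, if_pos hc, hclean]
        have hn : (if PySem.Chars.upperChar c = 'J' then 'I' else PySem.Chars.upperChar c)
            = pvNorm c := rfl
        rw [hn]
        by_cases ha : a = pvNorm c
        · rw [if_pos ha, ih]
          simp [pvG, ha]
        · rw [if_neg ha, ih]
          simp [pvG, ha]
    · have hclean : pvClean (c :: t) = pvClean t := by
        simp [pvClean, List.filter_cons, hc]
      simp only [pvLoopB, if_neg hc, hclean]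
      exact ih pend acc

lemma pvLoopA_post (n : Nat) :
    ∀ (q : List Char) (i : Nat) (acc : List String),
      q.length ≤ i + n → i ≤ q.length → i % 2 = 0 →
      pvPostA (pvLoopA q i acc) = acc ++ pvG (q.drop i) := by
  induction n with
  | zero =>
    intro q i acc hn hi hp
    have hiq : i = q.length := by omega
    rw [pvLoopA, dif_neg (by omega)]
    have hm : q.length % 2 = 0 := by omega
    simp [pvPostA, hm, List.drop_of_length_le (by omega : q.length ≤ i), pvG]
  | succ n ih =>
    intro q i acc hn hi hp
    by_cases h : i < q.length
    · by_cases he : i + 1 = q.length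
      · rw [pvLoopA, dif_pos h, dif_pos he, pvLoopA, dif_neg (by omega)]
        have h1 : (q.drop i).length = 1 := by simp; omega
        obtain ⟨a, ha⟩ := List.length_eq_one_iff.mp h1
        have hdrop : (q ++ ['X']).drop i = [a, 'X'] := by
          rw [List.drop_append_of_le_length (by omega)]; simp [ha]
        have hm : q.length % 2 = 1 := by omega
        simp only [pvPostA, List.length_append, List.length_cons, List.length_nil]
        rw [if_pos (by simp; omega)]
        rw [show q.length + 1 - 2 = i by omega, hdrop, ha]
        simp [pvG]
      · have h2 : 2 ≤ (q.drop i).length := by simp; omega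
        rcases hq : q.drop i with _ | ⟨a, _ | ⟨c, t⟩⟩
        · rw [hq] at h2; simp at h2
        · rw [hq] at h2; simp at h2
        have htake : (q.drop i).take 2 = [a, c] := by rw [hq]; rfl
        rw [pvLoopA, dif_pos h, dif_neg he, htake]
        dsimp only []
        have hd1 : q.drop (i + 1) = c :: t := by
          have h' : List.drop 1 (List.drop i q) = c :: t := by simp [hq]
          rw [List.drop_drop] at h'
          simpa [Nat.add_comm] using h'
        by_cases hac : a = c
        · rw [if_pos hac]
          have hlen : (q.take (i + 1) ++ 'X' :: q.drop (i + 1)).length = q.length + 1 := by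
            simp [Nat.min_eq_left (by omega : i + 1 ≤ q.length)]
          have hdrop2 : (q.take (i + 1) ++ 'X' :: q.drop (i + 1)).drop (i + 2) = c :: t := by
            have hlt : (q.take (i + 1)).length = i + 1 := by simp; omega
            rw [List.drop_append]
            simp [hlt, hd1, List.drop_of_length_le]
          rw [ih _ (i + 2) _ (by omega) (by omega) (by omega), hdrop2]
          subst hac
          simp [pvG, hq]
        · rw [if_neg hac]
          have hdrop2 : q.drop (i + 2) = t := by
            have h' : List.drop 1 (List.drop (i + 1) q) = t := by simp [hd1]
            rw [List.drop_drop] at h'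
            simpa [show 1 + (i + 1) = i + 2 by omega] using h'
          rw [ih _ (i + 2) _ (by omega) (by omega) (by omega), hdrop2]
          simp [pvG, hq, hac]
    · rw [pvLoopA, dif_neg h]
      have hm : q.length % 2 = 0 := by omega
      simp [pvPostA, hm, List.drop_of_length_le (by omega : q.length ≤ i), pvG]

-- ===== VERDICT (by name: the statement is the Claim_ definition above) =====
theorem makeBigramArr_spec : Claim_equal_makeBigramArr := by
  intro p _
  unfold Spec_makeBigramArr makeBigramArr_alt
  rw [pvMake_eq_post, pvLoopB_eq,
      pvLoopA_post (pvClean p.toList).length _ 0 [] (by omega) (by omega) (by omega)]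
  simp
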